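-- pv_equiv track=rewrite | github.com/manojdas/math | CGT/wyth.py | wyth_p_positions
-- ===== SOURCE A (Python) =====
-- def mex(mex_set):
--     ret = 0
--     while ret in mex_set:
--         ret += 1
--     return ret
--
-- def wyth_p_positions(max_n = 10):
--     mex_set = set()
--     ret = []
--     for n in range(max_n+1):
--         a_n = mex(mex_set)
--         b_n = a_n + n
--
--         mex_set.add(a_n)
--         mex_set.add(b_n)
--
--         ret.append((a_n, b_n))
--         ret.append((b_n, a_n))
--
--     return ret
-- ===== SOURCE B (Python) =====
-- def wyth_p_positions(max_n = 10):
--     # Queue of future b-values: b-values are produced in strictly increasing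
--     # order, so membership is a single head comparison against a read pointer
--     # instead of a set rescan from zero.
--     pending = []   # unconsumed b-values, strictly increasing
--     i = 0          # read pointer into pending
--     m = 0          # next candidate a-value
--     ret = []
--     for n in range(max_n + 1):
--         while i < len(pending) and pending[i] == m:
--             i += 1
--             m += 1
--         b = m + n
--         if b > m:              # b == a only at n == 0; m += 1 already skips it
--             pending.append(b)
--         ret.append((m, b))
--         ret.append((b, m))
--         m += 1
--     return ret
-- ===== Notes on version B (the rewrite author's own statement) =====
-- stated objective: faster
-- what changed: Replaced the per-iteration mex rescan over a growing set of all a- and b-values by a FIFO queue of the strictly increasing b-values with a read pointer and a monotone candidate counter, so each mex is found by head comparisons in amortized O(1) instead of a linear set scan.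
import Mathlib
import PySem

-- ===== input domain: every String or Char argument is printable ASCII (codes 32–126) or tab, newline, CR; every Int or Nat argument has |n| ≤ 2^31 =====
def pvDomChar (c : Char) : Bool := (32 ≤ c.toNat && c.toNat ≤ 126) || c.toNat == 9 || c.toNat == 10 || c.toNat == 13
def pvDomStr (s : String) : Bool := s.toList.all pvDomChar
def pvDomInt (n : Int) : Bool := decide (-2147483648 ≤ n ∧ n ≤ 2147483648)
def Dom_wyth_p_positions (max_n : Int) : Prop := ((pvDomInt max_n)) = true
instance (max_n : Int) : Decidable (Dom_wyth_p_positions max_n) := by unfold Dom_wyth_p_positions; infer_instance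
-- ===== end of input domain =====

-- B replaces A's per-iteration mex rescan over the set of all a- and b-values by a FIFO queue
-- of the strictly increasing b-values with a read pointer (objective: faster; return value only).

-- termination helper for A's membership-scan while loop (cited by decreasing_by)
lemma pvFilter_mono_len (p q : Int → Bool) (s : List Int) (h : ∀ x, p x = true → q x = true) :
    (s.filter p).length ≤ (s.filter q).length := by
  induction s with
  | nil => simp
  | cons y ys ih =>
    simp only [List.filter_cons]
    by_cases hp : p y = true
    · rw [if_pos hp, if_pos (h y hp)]; simpa using ih
    · rw [if_neg hp]
      split
      · simp; omega
      · exact ih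

lemma pvFilter_lt (s : List Int) (r : Int) (h : r ∈ s) :
    (s.filter (fun x => decide (r + 1 ≤ x))).length < (s.filter (fun x => decide (r ≤ x))).length := by
  induction s with
  | nil => cases h
  | cons y ys ih =>
    simp only [List.filter_cons]
    rcases List.mem_cons.1 h with rfl | hm
    · rw [if_neg (by simp), if_pos (by simp)]
      have := pvFilter_mono_len (fun x => decide (r + 1 ≤ x)) (fun x => decide (r ≤ x)) ys
        (by intro x hx; simp at hx ⊢; omega)
      simp only [List.length_cons]; omega
    · have hlt := ih hm
      by_cases h1 : r + 1 ≤ y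
      · rw [if_pos (by simpa using h1), if_pos (by simp; omega)]
        simp only [List.length_cons]; omega
      · rw [if_neg (by simpa using h1)]
        split
        · simp only [List.length_cons]; omega
        · exact hlt

-- ===== PORT A =====
-- A's helper 'mex': while ret in mex_set: ret += 1
def wythMexScan (ret : Int) (mex_set : PySem.Set Int) : Int :=
  if h : PySem.Set.contains mex_set ret = true then wythMexScan (ret + 1) mex_set else ret
termination_by (mex_set.filter (fun x => decide (ret ≤ x))).length
decreasing_by
  exact pvFilter_lt mex_set ret (by simpa [PySem.Set.contains] using h)

def wythMex (mex_set : PySem.Set Int) : Int := wythMexScan 0 mex_set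

def wythStepA (st : PySem.Set Int × List (List Int)) (n : Int) : PySem.Set Int × List (List Int) :=
  let a_n := wythMex st.1
  let b_n := a_n + n
  let mex_set := PySem.Set.add (PySem.Set.add st.1 a_n) b_n
  (mex_set, st.2 ++ [[a_n, b_n], [b_n, a_n]])

def wyth_p_positions (max_n : Int) : List (List Int) :=
  ((PySem.List.pyRange 0 (max_n + 1) 1).foldl wythStepA (PySem.Set.empty, [])).2

-- ===== PORT B =====
-- B's inner 'while i < len(pending) and pending[i] == m: i += 1; m += 1'
def wythDrain (pending : List Int) (i : Nat) (m : Int) : Nat × Int :=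
  if h : i < pending.length ∧ pending[i]? = some m then wythDrain pending (i + 1) (m + 1)
  else (i, m)
termination_by pending.length - i
decreasing_by omega

-- one iteration of B's for-loop over state (pending, i, m, ret)
def wythStepQ (st : List Int × Nat × Int × List (List Int)) (n : Int) :
    List Int × Nat × Int × List (List Int) :=
  let im := wythDrain st.1 st.2.1 st.2.2.1
  let m := im.2
  let b := m + n
  ((if b > m then st.1 ++ [b] else st.1), im.1, m + 1, st.2.2.2 ++ [[m, b], [b, m]])

def wyth_p_positions_alt (max_n : Int) : List (List Int) :=
  ((PySem.List.pyRange 0 (max_n + 1) 1).foldl wythStepQ ([], 0, 0, [])).2.2.2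

-- ===== PRECONDITION & SPEC =====
def Spec_wyth_p_positions (max_n : Int) (out : List (List Int)) : Prop := out = wyth_p_positions_alt max_n
instance (max_n : Int) (out : List (List Int)) : Decidable (Spec_wyth_p_positions max_n out) := by unfold Spec_wyth_p_positions; infer_instance

-- ===== CLAIM (what is proved, stated in full; the proofs are below) =====
def Claim_equal_wyth_p_positions : Prop := ∀ (max_n : Int), Dom_wyth_p_positions max_n → Spec_wyth_p_positions max_n (wyth_p_positions max_n)

-- ===== LEMMAS AND PROOFS =====

-- facts about A's mex scan
lemma wythMexScan_ge (p : Int) (s : PySem.Set Int) : p ≤ wythMexScan p s := by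
  fun_induction wythMexScan p s with
  | case1 p hc ih => omega
  | case2 p hc => omega

lemma wythMexScan_not_mem (p : Int) (s : PySem.Set Int) : wythMexScan p s ∉ s := by
  fun_induction wythMexScan p s with
  | case1 p hc ih => exact ih
  | case2 p hc => simpa [PySem.Set.contains] using hc

lemma wythMexScan_mem_of_lt (p : Int) (s : PySem.Set Int) :
    ∀ x, p ≤ x → x < wythMexScan p s → x ∈ s := by
  fun_induction wythMexScan p s with
  | case1 p hc ih =>
    intro x hpx hx
    rcases eq_or_lt_of_le hpx with rfl | hlt
    · simpa [PySem.Set.contains] using hc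
    · exact ih x (by omega) hx
  | case2 p hc => intro x hpx hx; omega

-- B's drain loop reaches exactly the mex a of s, consuming one queue entry per unit step
lemma wythDrain_spec (a : Int) (s : PySem.Set Int) :
    ∀ (k : Nat) (pending : List Int) (i : Nat) (m : Int),
    a - m = (k : Int) →
    i ≤ pending.length →
    List.Pairwise (· < ·) (pending.drop i) →
    (∀ x ∈ pending.drop i, m ≤ x) →
    (∀ x, m ≤ x → (x ∈ s ↔ x ∈ pending.drop i)) →
    a ∉ s → (∀ x, m ≤ x → x < a → x ∈ s) →
    wythDrain pending i m = (i + k, a) ∧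
      i + k ≤ pending.length ∧
      List.Pairwise (· < ·) (pending.drop (i + k)) ∧
      (∀ x ∈ pending.drop (i + k), a < x) ∧
      (∀ x, a + 1 ≤ x → (x ∈ s ↔ x ∈ pending.drop (i + k))) := by
  intro k
  induction k with
  | zero =>
    intro pending i m hk hi hsort hge hiff hans _
    have hma : m = a := by omega
    subst hma
    have hnot : m ∉ pending.drop i := fun hmem => hans ((hiff m le_rfl).mpr hmem)
    have hcond : ¬ (i < pending.length ∧ pending[i]? = some m) := by
      rintro ⟨hlen, hget⟩
      have : pending[i] = m := by
        have := List.getElem?_eq_getElem hlen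
        rw [this] at hget; exact Option.some.inj hget
      apply hnot
      rw [List.drop_eq_getElem_cons hlen, this]
      exact List.mem_cons_self
    rw [wythDrain, dif_neg hcond]
    refine ⟨rfl, by omega, hsort, ?_, ?_⟩
    · intro x hx
      have h1 := hge x hx
      have h2 : x ≠ m := fun h => hnot (h ▸ hx)
      omega
    · intro x hx
      simpa using hiff x (by omega)
  | succ k ih =>
    intro pending i m hk hi hsort hge hiff hans hbet
    have hms : m ∈ s := hbet m le_rfl (by omega)
    have hmem : m ∈ pending.drop i := (hiff m le_rfl).mp hms
    have hlen : i < pending.length := by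
      by_contra hc
      rw [List.drop_eq_nil_of_le (by omega)] at hmem
      exact absurd hmem (List.not_mem_nil)
    have hdrop : pending.drop i = pending[i] :: pending.drop (i + 1) :=
      List.drop_eq_getElem_cons hlen
    have hhead : pending[i] = m := by
      have hmem' : m ∈ pending[i] :: pending.drop (i + 1) := by rw [← hdrop]; exact hmem
      rcases List.mem_cons.mp hmem' with h | h
      · exact h.symm
      · exfalso
        have hlt : pending[i] < m := by
          have hp := hsort
          rw [hdrop] at hp
          exact (List.pairwise_cons.mp hp).1 m h
        have hge' : m ≤ pending[i] := by
          apply hge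
          rw [hdrop]
          exact List.mem_cons_self
        omega
    have hcond : i < pending.length ∧ pending[i]? = some m := by
      refine ⟨hlen, ?_⟩
      rw [List.getElem?_eq_getElem hlen, hhead]
    rw [wythDrain, dif_pos hcond]
    have htail_sort : List.Pairwise (· < ·) (pending.drop (i + 1)) := by
      have := hsort; rw [hdrop] at this; exact (List.pairwise_cons.mp this).2
    have htail_gt : ∀ x ∈ pending.drop (i + 1), m < x := by
      have := hsort; rw [hdrop, hhead] at this
      exact (List.pairwise_cons.mp this).1
    have hres := ih pending (i + 1) (m + 1) (by omega) (by omega) htail_sort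
      (fun x hx => by have := htail_gt x hx; omega)
      (fun x hx => by
        rw [hiff x (by omega), hdrop, List.mem_cons, hhead]
        constructor
        · rintro (rfl | h)
          · exact absurd hx (by omega)
          · exact h
        · exact Or.inr)
      hans (fun x h1 h2 => hbet x (by omega) h2)
    have harith : i + 1 + k = i + (k + 1) := by omega
    rw [harith] at hres
    exact hres

-- main loop invariant: A's (set, ret) and B's (pending, i, m, ret) stay related
lemma pvLoopQ (ns : List Int) (hns : List.Pairwise (· < ·) ns) :
    ∀ (s : PySem.Set Int) (pending : List Int) (i : Nat) (m : Int) (r : List (List Int)),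
    0 ≤ m →
    i ≤ pending.length →
    (∀ x, 0 ≤ x → x < m → x ∈ s) →
    List.Pairwise (· < ·) (pending.drop i) →
    (∀ x ∈ pending.drop i, m ≤ x) →
    (∀ x, m ≤ x → (x ∈ s ↔ x ∈ pending.drop i)) →
    (∀ x ∈ pending.drop i, ∀ n' ∈ ns, x < m + n') →
    (ns.foldl wythStepA (s, r)).2 = (ns.foldl wythStepQ (pending, i, m, r)).2.2.2 := by
  induction ns with
  | nil => intro s pending i m r _ _ _ _ _ _ _; rfl
  | cons n ns ih =>
    intro s pending i m r hm hi hbelow hsort hge hiff hlt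
    have hns' : List.Pairwise (· < ·) ns := (List.pairwise_cons.mp hns).2
    have hhd : ∀ n' ∈ ns, n < n' := (List.pairwise_cons.mp hns).1
    set a := wythMexScan 0 s with ha
    have h0a : 0 ≤ a := wythMexScan_ge 0 s
    have hans : a ∉ s := wythMexScan_not_mem 0 s
    have hmemlt : ∀ x, 0 ≤ x → x < a → x ∈ s := wythMexScan_mem_of_lt 0 s
    have hma : m ≤ a := by
      by_contra hc
      exact hans (hbelow a h0a (by omega))
    obtain ⟨k, hk⟩ : ∃ k : Nat, a - m = (k : Int) := ⟨(a - m).toNat, by omega⟩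
    obtain ⟨hdrain, hi', hsort', hgt', hiff'⟩ :=
      wythDrain_spec a s k pending i m hk hi hsort hge hiff hans
        (fun x h1 h2 => hmemlt x (by omega) h2)
    simp only [List.foldl_cons]
    have hstepA : wythStepA (s, r) n =
        (PySem.Set.add (PySem.Set.add s a) (a + n), r ++ [[a, a + n], [a + n, a]]) := rfl
    have hstepB : wythStepQ (pending, i, m, r) n =
        ((if a + n > a then pending ++ [a + n] else pending), i + k, a + 1,
          r ++ [[a, a + n], [a + n, a]]) := by
      simp only [wythStepQ, hdrain]
    rw [hstepA, hstepB]
    by_cases hn : a + n > a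
    · -- b appended to the queue
      rw [if_pos hn]
      have hdropapp : (pending ++ [a + n]).drop (i + k) = pending.drop (i + k) ++ [a + n] :=
        List.drop_append_of_le_length hi'
      refine ih hns' _ _ _ _ _ (by omega) (by simp; omega) ?_ ?_ ?_ ?_ ?_
      · intro x h1 h2
        simp only [PySem.Set.mem_add]
        rcases lt_or_eq_of_le (show x ≤ a by omega) with hlt' | rfl
        · exact Or.inl (Or.inl (hmemlt x h1 hlt'))
        · exact Or.inl (Or.inr rfl)
      · rw [hdropapp]
        rw [List.pairwise_append]
        refine ⟨hsort', by simp, ?_⟩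
        intro x hx y hy
        simp only [List.mem_singleton] at hy
        subst hy
        have hx2 : x ∈ List.drop k (List.drop i pending) := by rwa [List.drop_drop]
        have h1 := hlt x (List.mem_of_mem_drop hx2) n (List.mem_cons_self)
        omega
      · intro x hx
        rw [hdropapp] at hx
        rcases List.mem_append.mp hx with h | h
        · have := hgt' x h; omega
        · simp only [List.mem_singleton] at h; omega
      · intro x hx
        rw [hdropapp]
        simp only [PySem.Set.mem_add, List.mem_append, List.mem_singleton]
        rw [hiff' x hx]
        constructor
        · rintro ((h | h) | h)
          · exact Or.inl h
          · exact absurd h (by omega)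
          · exact Or.inr h
        · rintro (h | h)
          · exact Or.inl (Or.inl h)
          · exact Or.inr h
      · intro x hx n' hn'
        rw [hdropapp] at hx
        have hnn' := hhd n' hn'
        rcases List.mem_append.mp hx with h | h
        · have hx2 : x ∈ List.drop k (List.drop i pending) := by rwa [List.drop_drop]
          have := hlt x (List.mem_of_mem_drop hx2) n' (List.mem_cons_of_mem n hn')
          omega
        · simp only [List.mem_singleton] at h; omega
    · -- b ≤ a (only n ≤ 0): queue unchanged
      rw [if_neg hn]
      refine ih hns' _ _ _ _ _ (by omega) hi' ?_ hsort' (fun x hx => by have := hgt' x hx; omega) ?_ ?_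
      · intro x h1 h2
        simp only [PySem.Set.mem_add]
        rcases lt_or_eq_of_le (show x ≤ a by omega) with hlt' | rfl
        · exact Or.inl (Or.inl (hmemlt x h1 hlt'))
        · exact Or.inl (Or.inr rfl)
      · intro x hx
        simp only [PySem.Set.mem_add]
        rw [hiff' x hx]
        constructor
        · rintro ((h | h) | h)
          · exact h
          · exact absurd h (by omega)
          · exact absurd h (by omega)
        · exact fun h => Or.inl (Or.inl h)
      · intro x hx n' hn'
        have hnn' := hhd n' hn'
        have hx2 : x ∈ List.drop k (List.drop i pending) := by rwa [List.drop_drop]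
        have := hlt x (List.mem_of_mem_drop hx2) n' (List.mem_cons_of_mem n hn')
        omega

lemma pvRange_pairwise (b : Int) : ∀ a : Int, List.Pairwise (· < ·) (PySem.List.pyRange a b 1) := by
  intro a
  by_cases h : a < b
  · obtain ⟨k, hk⟩ : ∃ k : Nat, b - a = (k : Int) := ⟨(b - a).toNat, by omega⟩
    induction k generalizing a with
    | zero => omega
    | succ k ih =>
      rw [PySem.List.pyRange_one_cons h]
      rw [List.pairwise_cons]
      constructor
      · intro n' hn'
        simp only [PySem.List.mem_pyRange_one] at hn'
        omega
      · by_cases h' : a + 1 < b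
        · exact ih (a + 1) h' (by omega)
        · have : PySem.List.pyRange (a + 1) b 1 = [] := by
            simp [PySem.List.pyRange, (by omega : b ≤ a + 1)]
          rw [this]
          exact List.Pairwise.nil
  · have : PySem.List.pyRange a b 1 = [] := by simp [PySem.List.pyRange, (by omega : b ≤ a)]
    rw [this]
    exact List.Pairwise.nil

-- ===== VERDICT (by name: the statement is the Claim_ definition above) =====
theorem wyth_p_positions_spec : Claim_equal_wyth_p_positions := by
  intro max_n _
  unfold Spec_wyth_p_positions wyth_p_positions wyth_p_positions_alt
  refine pvLoopQ _ (pvRange_pairwise _ _) _ _ _ _ _ le_rfl (by simp) ?_ ?_ ?_ ?_ ?_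
  · intro x h1 h2; omega
  · simp
  · simp
  · intro x _; simp [pysem, PySem.Set.empty]
  · simp
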